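-- pv_equiv track=rewrite | github.com/LU1IN001/S1_TME-TD | TP3/Ex_4-5_Axel_Danappe-Laclef_Wilhem_Blondel.py | existe_couples_divise
-- ===== SOURCE A (Python) =====
-- def existe_couples_divise(n: int, p: int) -> bool:
--     """Préconditions: n <= p
--     Renvoie True s'il exitse un couple d'entiers distincts dans l'intervalle [n, p] qui se divise
--     """
--     i: int = n
--     j: int = n
--     nb_couple: int = 0
--     existe: bool = False
--     while i <= p and not existe:
--         while j <= p and not existe:
--             if(i < j and i != 0 and j % i == 0):
--                 existe = True
--             j = j + 1
--         i = i + 1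
--         j = n
--     return existe
-- ===== SOURCE B (Python) =====
-- def existe_couples_divise(n: int, p: int) -> bool:
--     """Closed form: a dividing pair exists iff either the interval
--     contains a negative number and 0 (0 is a multiple of any negative i),
--     or the smallest positive candidate i = max(n, 1) has 2*i <= p."""
--     return (n < 0 and 0 <= p) or 2 * max(n, 1) <= p
-- ===== Notes on version B (the rewrite author's own statement) =====
-- stated objective: simpler
-- what changed: Replaced the nested scan over all pairs (i,j) in [n,p] by a one-line closed-form test: a dividing pair exists iff the interval contains a negative number together with 0, or 2*max(n,1) <= p.
import Mathlib
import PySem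

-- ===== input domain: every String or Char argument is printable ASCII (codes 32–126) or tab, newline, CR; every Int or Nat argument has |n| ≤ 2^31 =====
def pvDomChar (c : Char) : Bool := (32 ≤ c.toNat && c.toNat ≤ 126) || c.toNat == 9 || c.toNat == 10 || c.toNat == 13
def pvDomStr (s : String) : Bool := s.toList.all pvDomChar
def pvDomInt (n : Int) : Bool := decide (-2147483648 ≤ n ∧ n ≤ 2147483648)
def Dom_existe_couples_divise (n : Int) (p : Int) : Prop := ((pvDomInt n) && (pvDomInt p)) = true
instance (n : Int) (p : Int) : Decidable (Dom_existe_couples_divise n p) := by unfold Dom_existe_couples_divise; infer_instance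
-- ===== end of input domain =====

-- B replaces A's nested pair scan by a one-line closed-form test; both return the same Bool on every input.

-- ===== PORT A =====
-- inner while loop: 'while j <= p and not existe: if (i < j and i != 0 and j % i == 0): existe = True; j += 1'
-- (fuel = number of remaining iterations, (p + 1 - j).toNat at entry; the loop body is ported verbatim)
def pvInnerA (p i : Int) : Nat → Int → Bool → Bool
  | 0, _, existe => existe
  | fuel + 1, j, existe =>
    if j ≤ p ∧ existe = false then
      pvInnerA p i fuel (j + 1)
        (if i < j ∧ i ≠ 0 ∧ PySem.Int.mod j i = 0 then true else existe)
    else existe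

-- outer while loop: 'while i <= p and not existe: <inner loop from j = n>; i += 1; j = n'
def pvOuterA (n p : Int) : Nat → Int → Bool → Bool
  | 0, _, existe => existe
  | fuel + 1, i, existe =>
    if i ≤ p ∧ existe = false then
      pvOuterA n p fuel (i + 1) (pvInnerA p i (p + 1 - n).toNat n existe)
    else existe

def existe_couples_divise (n : Int) (p : Int) : Bool :=
  pvOuterA n p (p + 1 - n).toNat n false

-- ===== PORT B =====
-- closed form: a pair exists iff the interval holds a negative i together with 0,
-- or i = max(n,1) has its double 2*i still ≤ p.
def existe_couples_divise_alt (n : Int) (p : Int) : Bool :=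
  (decide (n < 0) && decide (0 ≤ p)) || decide (2 * max n 1 ≤ p)

-- ===== PRECONDITION & SPEC =====
def Spec_existe_couples_divise (n : Int) (p : Int) (out : Bool) : Prop := out = existe_couples_divise_alt n p
instance (n : Int) (p : Int) (out : Bool) : Decidable (Spec_existe_couples_divise n p out) := by unfold Spec_existe_couples_divise; infer_instance

-- ===== CLAIM (what is proved, stated in full; the proofs are below) =====
def Claim_equal_existe_couples_divise : Prop := ∀ (n : Int) (p : Int), Dom_existe_couples_divise n p → Spec_existe_couples_divise n p (existe_couples_divise n p)

-- ===== LEMMAS AND PROOFS =====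

theorem pvInnerA_true (p i : Int) : ∀ (f : Nat) (j : Int), pvInnerA p i f j true = true := by
  intro f
  induction f with
  | zero => intro j; rfl
  | succ f _ => intro j; simp [pvInnerA]

theorem pvOuterA_true (n p : Int) : ∀ (f : Nat) (i : Int), pvOuterA n p f i true = true := by
  intro f
  induction f with
  | zero => intro i; rfl
  | succ f ih =>
    intro i
    simp only [pvOuterA]
    split
    · rename_i h; exact absurd h.2 (by simp)
    · rfl

theorem pvInnerA_spec (p i : Int) : ∀ (f : Nat) (j : Int), (p + 1 - j).toNat = f →
    (pvInnerA p i f j false = true ↔ ∃ k : Int, j ≤ k ∧ k ≤ p ∧ i < k ∧ i ≠ 0 ∧ i ∣ k) := by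
  intro f
  induction f with
  | zero =>
    intro j hf
    simp only [pvInnerA]
    constructor
    · intro h; exact absurd h (by simp)
    · rintro ⟨k, h1, h2, _⟩; omega
  | succ f ih =>
    intro j hf
    have hj : j ≤ p := by omega
    rw [pvInnerA, if_pos ⟨hj, rfl⟩]
    by_cases hc : i < j ∧ i ≠ 0 ∧ PySem.Int.mod j i = 0
    · rw [if_pos hc, pvInnerA_true]
      simp only [true_iff]
      exact ⟨j, le_refl j, hj, hc.1, hc.2.1, (PySem.Int.mod_eq_zero_iff_dvd j i).mp hc.2.2⟩
    · rw [if_neg hc, ih (j + 1) (by omega)]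
      constructor
      · rintro ⟨k, h1, h2, h3, h4, h5⟩; exact ⟨k, by omega, h2, h3, h4, h5⟩
      · rintro ⟨k, h1, h2, h3, h4, h5⟩
        refine ⟨k, ?_, h2, h3, h4, h5⟩
        rcases lt_or_eq_of_le h1 with h | h
        · omega
        · exfalso; apply hc
          subst h
          exact ⟨h3, h4, (PySem.Int.mod_eq_zero_iff_dvd _ i).mpr h5⟩

theorem pvOuterA_spec (n p : Int) : ∀ (f : Nat) (i : Int), (p + 1 - i).toNat = f →
    (pvOuterA n p f i false = true ↔
      ∃ k : Int, i ≤ k ∧ k ≤ p ∧ ∃ m : Int, n ≤ m ∧ m ≤ p ∧ k < m ∧ k ≠ 0 ∧ k ∣ m) := by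
  intro f
  induction f with
  | zero =>
    intro i hf
    simp only [pvOuterA]
    constructor
    · intro h; exact absurd h (by simp)
    · rintro ⟨k, h1, h2, _⟩; omega
  | succ f ih =>
    intro i hf
    have hi : i ≤ p := by omega
    rw [pvOuterA, if_pos ⟨hi, rfl⟩]
    by_cases hin : pvInnerA p i (p + 1 - n).toNat n false = true
    · rw [hin, pvOuterA_true]
      simp only [true_iff]
      obtain ⟨m, h1, h2, h3, h4, h5⟩ := (pvInnerA_spec p i (p + 1 - n).toNat n rfl).mp hin
      exact ⟨i, le_refl i, hi, m, h1, h2, h3, h4, h5⟩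
    · rw [Bool.not_eq_true] at hin
      rw [hin, ih (i + 1) (by omega)]
      constructor
      · rintro ⟨k, h1, rest⟩; exact ⟨k, by omega, rest⟩
      · rintro ⟨k, h1, h2, m, hm⟩
        rcases lt_or_eq_of_le h1 with h | h
        · exact ⟨k, by omega, h2, m, hm⟩
        · exfalso
          subst h
          have := (pvInnerA_spec p i (p + 1 - n).toNat n rfl).mpr
            ⟨m, hm.1, hm.2.1, hm.2.2.1, hm.2.2.2.1, hm.2.2.2.2⟩
          rw [hin] at this
          exact Bool.false_ne_true this

theorem exists_iff_closed (n p : Int) :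
    (∃ k : Int, n ≤ k ∧ k ≤ p ∧ ∃ m : Int, n ≤ m ∧ m ≤ p ∧ k < m ∧ k ≠ 0 ∧ k ∣ m) ↔
    ((n < 0 ∧ 0 ≤ p) ∨ 2 * max n 1 ≤ p) := by
  constructor
  · rintro ⟨k, hnk, hkp, m, hnm, hmp, hkm, hk0, c, rfl⟩
    rcases lt_or_gt_of_ne hk0 with hneg | hpos
    · -- k < 0: k*c > k = k*1 forces c ≤ 0, hence k*c ≥ 0, so 0 ≤ p and n < 0
      left
      have hc : c ≤ 0 := by nlinarith
      have : 0 ≤ k * c := by nlinarith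
      constructor <;> omega
    · -- k > 0: k*c > k = k*1 forces c ≥ 2, hence k*c ≥ 2*k ≥ 2*max n 1
      right
      have hc : 2 ≤ c := by nlinarith
      have h2k : 2 * k ≤ k * c := by nlinarith
      have : max n 1 ≤ k := max_le hnk hpos
      omega
  · rintro (⟨hn, hp⟩ | h)
    · exact ⟨n, le_refl n, by omega, 0, by omega, hp, hn, by omega, dvd_zero n⟩
    · refine ⟨max n 1, le_max_left n 1, by omega, 2 * max n 1, ?_, h, ?_, by omega,
        ⟨2, by ring⟩⟩
      · have := le_max_right n 1; omega
      · have := le_max_right n 1; omega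

-- ===== VERDICT (by name: the statement is the Claim_ definition above) =====
theorem existe_couples_divise_spec : Claim_equal_existe_couples_divise := by
  intro n p _
  unfold Spec_existe_couples_divise existe_couples_divise
  rw [Bool.eq_iff_iff, pvOuterA_spec n p (p + 1 - n).toNat n rfl, exists_iff_closed]
  unfold existe_couples_divise_alt
  simp
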